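-- pv_equiv track=rewrite | github.com/gabribribribri/bonbon-beguin | bonbon-beguin.py | detecter_alignements
-- ===== SOURCE A (Python) =====
-- def detecter_alignements(grille: list[list[int]]): # decouverte des ensembles c'est une dinguerie
--     """
--     Détecte les alignements horizontaux et verticaux de 3 bonbons ou plus, en ligne ou en colonne.
--     entrée :
--         - grille : (list[list[int]])
--     sortie :
--         - a_supprimer : (set[tuple[int]])
--     """
--     a_supprimer = set()
--     nb_lignes = len(grille)
--     nb_colonnes = len(grille[0])
--
--     # horizontal
--     for l in range(nb_lignes):
--         c = 0
--         while c < nb_colonnes: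
--             valeur_actuelle = grille[l][c]
--             if valeur_actuelle != -1:
--                 debut = c
--                 while c < nb_colonnes and grille[l][c] == valeur_actuelle:
--                     c += 1
--                 longueur = c - debut
--                 if longueur >= 3:
--                     for i in range(debut, c):
--                         a_supprimer.add((l, i))
--             else:
--                 c += 1
--
--     # vertical
--     for j in range(nb_colonnes):
--         l = 0
--         while l < nb_lignes:
--             valeur_actuelle = grille[l][j]
--             if valeur_actuelle != -1:
--                 debut = l
--                 while l < nb_lignes and grille[l][j] == valeur_actuelle:
--                     l += 1
--
--                 longueur = l - debut
--                 if longueur >= 3: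
--                     for i in range(debut, l):
--                         a_supprimer.add((i, j))
--             else:
--                 l += 1
--
--     return a_supprimer
-- ===== SOURCE B (Python) =====
-- def detecter_alignements(grille: list[list[int]]):
--     """Local stencil test: a cell (within the first len(grille[0]) columns) is removed
--     iff some length-3 constant non-(-1) window (horizontal or vertical) covers it;
--     no run tracking at all."""
--     nb_lignes = len(grille)
--     nb_colonnes = len(grille[0])
--
--     def window_hit(get, i, n):
--         v = get(i)
--         if v == -1:
--             return False
--         return any(0 <= i + d and i + d + 2 < n
--                    and get(i + d) == v and get(i + d + 1) == v and get(i + d + 2) == v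
--                    for d in (-2, -1, 0))
--
--     a_supprimer = set()
--     for l in range(nb_lignes):
--         for c in range(nb_colonnes):
--             if window_hit(lambda k: grille[l][k], c, nb_colonnes):
--                 a_supprimer.add((l, c))
--     for j in range(nb_colonnes):
--         for i in range(nb_lignes):
--             if window_hit(lambda k: grille[k][j], i, nb_lignes):
--                 a_supprimer.add((i, j))
--     return a_supprimer
-- ===== Notes on version B (the rewrite author's own statement) =====
-- stated objective: alternative
-- what changed: Replaces A's run-length scanning (nested while loops that find maximal runs and flush those of length >= 3) by a purely local per-cell stencil test: a cell is removed iff one of the three length-3 windows through it (per direction) is constant and non-(-1).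
import Mathlib
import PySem

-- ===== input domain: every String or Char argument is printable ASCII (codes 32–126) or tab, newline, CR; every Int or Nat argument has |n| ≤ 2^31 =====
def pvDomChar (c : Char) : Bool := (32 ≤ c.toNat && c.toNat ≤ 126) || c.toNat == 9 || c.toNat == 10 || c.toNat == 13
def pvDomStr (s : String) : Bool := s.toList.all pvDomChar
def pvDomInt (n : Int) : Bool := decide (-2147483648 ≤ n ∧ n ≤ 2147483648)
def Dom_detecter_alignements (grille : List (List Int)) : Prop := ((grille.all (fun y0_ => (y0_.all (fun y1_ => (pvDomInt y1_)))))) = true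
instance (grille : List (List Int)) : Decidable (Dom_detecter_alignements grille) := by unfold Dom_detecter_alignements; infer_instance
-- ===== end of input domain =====

-- B replaces A's run-length scanning by a per-cell local stencil test (a cell is removed iff
-- some length-3 constant non-(-1) window covers it); objective: alternative algorithm, same cost.
-- Return value only; neither program mutates its argument.

-- ===== PORT A =====
-- 'for i in range(debut, debut+len): a_supprimer.add(mk(i))'
def pvAddRange (mk : Nat → Int × Int) (a len : Nat) (acc : List (Int × Int)) : List (Int × Int) :=
  (List.range' a len).foldl (fun s i => PySem.Set.add s (mk i)) acc

-- inner 'while c < nb and line[c] == v: c += 1' (line.getD is exact: Pre_ keeps indices in range)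
def aInner (line : List Int) (n : Nat) (v : Int) (c : Nat) : Nat :=
  if _h : c < n then
    if line.getD c 0 = v then aInner line n v (c + 1) else c
  else c
termination_by n - c

-- termination fact for the outer loop (cited in aScan's decreasing_by)
theorem aInner_ge (line : List Int) (n : Nat) (v : Int) (c : Nat) : c ≤ aInner line n v c := by
  fun_induction aInner <;> omega

-- outer 'while c < nb:' body of A, one copy per direction via mk
def aScan (line : List Int) (n : Nat) (mk : Nat → Int × Int) (c : Nat)
    (acc : List (Int × Int)) : List (Int × Int) :=
  if _h : c < n then
    if line.getD c 0 ≠ -1 then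
      aScan line n mk (aInner line n (line.getD c 0) c)
        (if 3 ≤ aInner line n (line.getD c 0) c - c then
            pvAddRange mk c (aInner line n (line.getD c 0) c - c) acc
          else acc)
    else aScan line n mk (c + 1) acc
  else acc
termination_by n - c
decreasing_by
  · have h1 : aInner line n (line.getD c 0) c = aInner line n (line.getD c 0) (c + 1) := by
      rw [aInner]; simp [_h]
    have h2 := aInner_ge line n (line.getD c 0) (c + 1)
    omega
  · omega

def detecter_alignements (grille : List (List Int)) : List (Int × Int) :=
  let nb_lignes := grille.length
  let nb_colonnes := (grille.getD 0 []).length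
  let horiz := (List.range nb_lignes).foldl
    (fun acc (l : Nat) => aScan (grille.getD l []) nb_colonnes (fun i => ((l : Int), (i : Int))) 0 acc) []
  (List.range nb_colonnes).foldl
    (fun acc (j : Nat) => aScan (grille.map (fun r => r.getD j 0)) nb_lignes
      (fun i => ((i : Int), (j : Int))) 0 acc) horiz

-- ===== PORT B =====
-- window_hit(get, i, n): Python's short-circuit 'and' guards the accesses, so every get index
-- is in [0, n); .toNat is applied only after the 0 ≤ i+d guard (exact)
def bWindowHit (get : Nat → Int) (i n : Nat) : Bool :=
  if get i = -1 then false
  else [(-2 : Int), -1, 0].any (fun d =>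
    decide (0 ≤ (i : Int) + d) && decide ((i : Int) + d + 2 < (n : Int)) &&
    (get ((i : Int) + d).toNat == get i) && (get (((i : Int) + d).toNat + 1) == get i) &&
    (get (((i : Int) + d).toNat + 2) == get i))

def detecter_alignements_alt (grille : List (List Int)) : List (Int × Int) :=
  let nb_lignes := grille.length
  let nb_colonnes := (grille.getD 0 []).length
  let pass1 := (List.range nb_lignes).foldl (fun acc (l : Nat) =>
    (List.range nb_colonnes).foldl (fun acc (c : Nat) =>
      if bWindowHit (fun k => (grille.getD l []).getD k 0) c nb_colonnes then
        PySem.Set.add acc ((l : Int), (c : Int)) else acc) acc) []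
  (List.range nb_colonnes).foldl (fun acc (j : Nat) =>
    (List.range nb_lignes).foldl (fun acc (i : Nat) =>
      if bWindowHit (fun k => (grille.getD k []).getD j 0) i nb_lignes then
        PySem.Set.add acc ((i : Int), (j : Int)) else acc) acc) pass1

-- ===== PRECONDITION & SPEC =====
-- Pre_ is exactly where the Python A returns: A raises IndexError iff the grid is empty
-- (grille[0]) or some row is shorter than the first row (grille[l][c] with c < len(grille[0]));
-- cells of a row beyond column len(grille[0])-1 are ignored by both programs.
def Pre_detecter_alignements (grille : List (List Int)) : Prop :=
  grille ≠ [] ∧ ∀ r ∈ grille, (grille.getD 0 []).length ≤ r.length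
instance (grille : List (List Int)) : Decidable (Pre_detecter_alignements grille) := by
  unfold Pre_detecter_alignements; infer_instance

def pvWitness_detecter_alignements : List (List Int) := [[1, 1, 1], [2, 0, 2], [0, 2, 0]]

def Spec_detecter_alignements (grille : List (List Int)) (out : List (Int × Int)) : Prop :=
  out = detecter_alignements_alt grille
instance (grille : List (List Int)) (out : List (Int × Int)) :
    Decidable (Spec_detecter_alignements grille out) := by
  unfold Spec_detecter_alignements; infer_instance

-- ===== CLAIM (what is proved, stated in full; the proofs are below) =====
def Claim_equal_detecter_alignements : Prop :=
  ∀ (grille : List (List Int)), Dom_detecter_alignements grille →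
    Pre_detecter_alignements grille →
    Spec_detecter_alignements grille (detecter_alignements grille)

-- ===== LEMMAS AND PROOFS =====

-- B's stencil condition on a concrete line, and its fold over a list of indices
def pvLineHit (line : List Int) (i : Nat) : Bool :=
  bWindowHit (fun k => line.getD k 0) i line.length

def pvStencil (line : List Int) (mk : Nat → Int × Int) (idxs : List Nat)
    (acc : List (Int × Int)) : List (Int × Int) :=
  idxs.foldl (fun s i => if pvLineHit line i then PySem.Set.add s (mk i) else s) acc

-- invariant at every call site of A's outer loop: position c is a run boundary
def pvInv (line : List Int) (c : Nat) : Prop :=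
  c = 0 ∨ line.length ≤ c ∨ line.getD (c - 1) 0 ≠ line.getD c 0 ∨ line.getD (c - 1) 0 = -1

theorem pv_getD_take (l : List Int) (n k : Nat) (hk : k < n) :
    (l.take n).getD k 0 = l.getD k 0 := by
  rw [List.getD_eq_getElem?_getD, List.getD_eq_getElem?_getD, List.getElem?_take, if_pos hk]

theorem pv_col_getD (grille : List (List Int)) (j : Nat) (k : Nat) :
    (grille.map (fun r => r.getD j 0)).getD k 0 = (grille.getD k []).getD j 0 := by
  rw [List.getD_eq_getElem?_getD, List.getElem?_map,
    List.getD_eq_getElem?_getD (l := grille)]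
  cases h : grille[k]? <;> simp

theorem pv_drop_takeWhile (l : List Int) (p : Int → Bool) :
    l.drop (l.takeWhile p).length = l.dropWhile p := by
  nth_rewrite 2 [← List.takeWhile_append_dropWhile (p := p) (l := l)]
  rw [List.drop_left]

-- one window of the any-list, under pointwise-equal access functions
theorem pvWin1_congr (g g' : Nat → Int) (v : Int) (i n : Nat) (d : Int)
    (h : ∀ k, k < n → g k = g' k) :
    (decide (0 ≤ (i : Int) + d) && decide ((i : Int) + d + 2 < (n : Int)) &&
     (g ((i : Int) + d).toNat == v) && (g (((i : Int) + d).toNat + 1) == v) &&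
     (g (((i : Int) + d).toNat + 2) == v))
    = (decide (0 ≤ (i : Int) + d) && decide ((i : Int) + d + 2 < (n : Int)) &&
       (g' ((i : Int) + d).toNat == v) && (g' (((i : Int) + d).toNat + 1) == v) &&
       (g' (((i : Int) + d).toNat + 2) == v)) := by
  by_cases h1 : (0 : Int) ≤ (i : Int) + d
  · by_cases h2 : (i : Int) + d + 2 < (n : Int)
    · rw [h _ (by omega), h _ (by omega), h _ (by omega)]
    · simp [h2]
  · simp [h1]

theorem pv_bWindowHit_congr (g g' : Nat → Int) (i n : Nat) (hi : i < n)
    (h : ∀ k, k < n → g k = g' k) : bWindowHit g i n = bWindowHit g' i n := by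
  unfold bWindowHit
  rw [h i hi]
  by_cases hv : g' i = -1
  · simp [hv]
  · simp only [if_neg hv, List.any_cons, List.any_nil, Bool.or_false]
    rw [pvWin1_congr g g' (g' i) i n (-2) h, pvWin1_congr g g' (g' i) i n (-1) h,
      pvWin1_congr g g' (g' i) i n 0 h]

theorem aInner_congr (line line' : List Int) (n : Nat) (v : Int)
    (h : ∀ k, k < n → line.getD k 0 = line'.getD k 0) (c : Nat) :
    aInner line n v c = aInner line' n v c := by
  fun_induction aInner line n v c with
  | case1 c hc heq ih =>
    rw [ih]
    conv_rhs => rw [aInner]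
    rw [dif_pos hc, if_pos ((h c hc).symm.trans heq)]
  | case2 c hc hne =>
    conv_rhs => rw [aInner]
    rw [dif_pos hc, if_neg (fun hx => hne ((h c hc).trans hx))]
  | case3 c hc =>
    conv_rhs => rw [aInner]
    rw [dif_neg hc]

theorem aScan_congr (line line' : List Int) (n : Nat) (mk : Nat → Int × Int)
    (h : ∀ k, k < n → line.getD k 0 = line'.getD k 0) :
    ∀ c acc, aScan line n mk c acc = aScan line' n mk c acc := by
  intro c acc
  fun_induction aScan line n mk c acc with
  | case1 c acc hc hne ih =>
    simp only [dite_eq_ite] at ih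
    rw [ih]
    conv_rhs => rw [aScan]
    rw [dif_pos hc, ← h c hc, ← aInner_congr line line' n (line.getD c 0) h c, if_pos hne]
  | case2 c acc hc hne ih =>
    have h1 : line.getD c 0 = -1 := by simpa using hne
    rw [ih]
    conv_rhs => rw [aScan]
    rw [dif_pos hc, ← h c hc, if_neg (fun hx => hx h1)]
  | case3 c acc hc =>
    conv_rhs => rw [aScan]
    rw [dif_neg hc]

theorem aInner_eq (line : List Int) (v : Int) (c : Nat) :
    aInner line line.length v c = c + ((line.drop c).takeWhile (· == v)).length := by
  fun_induction aInner with
  | case1 c _h heq ih =>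
    rw [List.drop_eq_getElem_cons _h, List.takeWhile_cons]
    rw [List.getD_eq_getElem line 0 _h] at heq
    simp [heq, ih]; omega
  | case2 c _h hne =>
    rw [List.drop_eq_getElem_cons _h, List.takeWhile_cons]
    rw [List.getD_eq_getElem line 0 _h] at hne
    simp [hne]
  | case3 c _h =>
    rw [List.drop_eq_nil_of_le (by omega)]
    simp

-- the stencil test on a maximal run: inside a run [c, c') it decides exactly 'run length ≥ 3'
theorem pvLineHit_run (line : List Int) (c c' : Nat)
    (hInv : pvInv line c) (hc : c < line.length) (hv : line.getD c 0 ≠ -1)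
    (hF2 : c' ≤ line.length)
    (hF1 : ∀ k, c ≤ k → k < c' → line.getD k 0 = line.getD c 0)
    (hF3 : c' < line.length → line.getD c' 0 ≠ line.getD c 0)
    (i : Nat) (hi1 : c ≤ i) (hi2 : i < c') :
    pvLineHit line i = decide (3 ≤ c' - c) := by
  have hiv : line.getD i 0 = line.getD c 0 := hF1 i hi1 hi2
  simp only [pvLineHit, bWindowHit]
  rw [hiv, if_neg hv]
  by_cases h3 : 3 ≤ c' - c
  · rw [decide_eq_true h3]
    obtain ⟨t, ht1, ht2, ht3, ht4⟩ : ∃ t, c ≤ t ∧ t ≤ i ∧ i ≤ t + 2 ∧ t + 2 < c' :=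
      ⟨min i (c' - 3), by omega, by omega, by omega, by omega⟩
    refine List.any_eq_true.mpr ⟨(t : Int) - (i : Int), ?_, ?_⟩
    · have hd : (t : Int) - (i : Int) = -2 ∨ (t : Int) - (i : Int) = -1 ∨
          (t : Int) - (i : Int) = 0 := by omega
      rcases hd with hd | hd | hd <;> rw [hd] <;> simp
    · have hsum : (i : Int) + ((t : Int) - (i : Int)) = (t : Int) := by ring
      rw [hsum, Int.toNat_natCast]
      have e1 : line.getD t 0 = line.getD c 0 := hF1 _ ht1 (by omega)
      have e2 : line.getD (t + 1) 0 = line.getD c 0 := hF1 _ (by omega) (by omega)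
      have e3 : line.getD (t + 2) 0 = line.getD c 0 := hF1 _ (by omega) (by omega)
      simp only [e1, e2, e3, beq_self_eq_true, Bool.and_true]
      rw [Bool.and_eq_true, decide_eq_true_iff, decide_eq_true_iff]
      omega
  · rw [decide_eq_false h3]
    refine List.any_eq_false.mpr ?_
    intro d hd hp
    have hd' : d = -2 ∨ d = -1 ∨ d = 0 := by simpa using hd
    simp only [Bool.and_eq_true, decide_eq_true_eq, beq_iff_eq] at hp
    obtain ⟨⟨⟨⟨h1, h2⟩, h3a⟩, h3b⟩, h3c⟩ := hp
    have hsv : (((i : Int) + d).toNat : Int) = (i : Int) + d := by omega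
    have hdb : (-2 : Int) ≤ d ∧ d ≤ 0 := by rcases hd' with h | h | h <;> omega
    -- Nat bounds for the window start s
    have hbounds : ((i : Int) + d).toNat ≤ i ∧ i ≤ ((i : Int) + d).toNat + 2 ∧
        ((i : Int) + d).toNat + 2 < line.length := by omega
    have hcs : c ≤ ((i : Int) + d).toNat := by
      by_contra hlt
      have hc1 : c - 1 = ((i : Int) + d).toNat ∨ c - 1 = ((i : Int) + d).toNat + 1 ∨
          c - 1 = ((i : Int) + d).toNat + 2 := by omega
      have hval : line.getD (c - 1) 0 = line.getD c 0 := by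
        rcases hc1 with h | h | h <;> rw [h] <;> [exact h3a; exact h3b; exact h3c]
      rcases hInv with h0 | hlen | hneq | hm1
      · omega
      · omega
      · exact hneq hval
      · exact hv (hval.symm.trans hm1)
    have hsc' : ((i : Int) + d).toNat + 2 < c' := by
      by_contra hge
      have hc'n : c' < line.length := by omega
      have hcases : c' = ((i : Int) + d).toNat + 1 ∨ c' = ((i : Int) + d).toNat + 2 := by omega
      have hval : line.getD c' 0 = line.getD c 0 := by
        rcases hcases with h | h <;> rw [h] <;> [exact h3b; exact h3c]
      exact hF3 hc'n hval
    omega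

theorem pvStencil_run_true (line : List Int) (mk : Nat → Int × Int) (c len : Nat)
    (acc : List (Int × Int)) (h : ∀ i ∈ List.range' c len, pvLineHit line i = true) :
    pvStencil line mk (List.range' c len) acc = pvAddRange mk c len acc := by
  unfold pvStencil pvAddRange
  exact PySem.List.foldl_congr_mem' _ _ _ _ (fun i hi acc' => by rw [h i hi]; simp)

theorem pvStencil_skip (line : List Int) (mk : Nat → Int × Int) (idxs : List Nat)
    (acc : List (Int × Int)) (h : ∀ i ∈ idxs, pvLineHit line i = false) :
    pvStencil line mk idxs acc = acc := by
  induction idxs generalizing acc with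
  | nil => rfl
  | cons a l ih =>
    unfold pvStencil
    rw [List.foldl_cons, h a (by simp)]
    exact ih acc (fun i hi => h i (by simp [hi]))

-- the heart of the proof: A's outer loop from a run boundary computes B's stencil fold
theorem aScan_eq_pvStencil (line : List Int) (mk : Nat → Int × Int) :
    ∀ c acc, pvInv line c →
      aScan line line.length mk c acc
        = pvStencil line mk (List.range' c (line.length - c)) acc := by
  intro c acc
  fun_induction aScan line line.length mk c acc with
  | case1 c acc hc hne ih =>
    intro hInv
    simp only [dite_eq_ite] at ih
    have hne' : line.getD c 0 ≠ -1 := hne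
    have hvg : line.getD c 0 = getElem line c hc := List.getD_eq_getElem line 0 hc
    have hTW : (line.drop c).takeWhile (· == line.getD c 0)
        = line.getD c 0 :: ((line.drop (c + 1)).takeWhile (· == line.getD c 0)) := by
      rw [List.drop_eq_getElem_cons hc, List.takeWhile_cons, ← hvg]
      simp
    have hA : aInner line line.length (line.getD c 0) c
        = c + ((line.drop c).takeWhile (· == line.getD c 0)).length :=
      aInner_eq line (line.getD c 0) c
    have hTpos : 0 < ((line.drop c).takeWhile (· == line.getD c 0)).length := by
      rw [hTW]; simp
    have hF2 : ((line.drop c).takeWhile (· == line.getD c 0)).length ≤ line.length - c := by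
      have := (List.takeWhile_prefix (l := line.drop c) (p := (· == line.getD c 0))).length_le
      simpa using this
    have hF1 : ∀ k, c ≤ k → k < c + ((line.drop c).takeWhile (· == line.getD c 0)).length →
        line.getD k 0 = line.getD c 0 := by
      intro k hk1 hk2
      have hj : k - c < ((line.drop c).takeWhile (· == line.getD c 0)).length := by omega
      have hjd : k - c < (line.drop c).length := by simp; omega
      have e1 : ((line.drop c).takeWhile (· == line.getD c 0))[k - c]'hj
          = (line.drop c)[k - c]'hjd :=
        (List.takeWhile_prefix _).getElem hj
      have hp : (((line.drop c).takeWhile (· == line.getD c 0))[k - c]'hj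
          == line.getD c 0) = true :=
        List.mem_takeWhile_imp (p := (· == line.getD c 0)) (l := line.drop c)
          (List.getElem_mem hj)
      rw [e1, List.getElem_drop] at hp
      have hck : c + (k - c) = k := by omega
      have hp' : line.getD (c + (k - c)) 0 = line.getD c 0 := by
        rw [List.getD_eq_getElem line 0 (by omega)]
        simpa using hp
      rw [hck] at hp'
      exact hp'
    have hF3 : c + ((line.drop c).takeWhile (· == line.getD c 0)).length < line.length →
        line.getD (c + ((line.drop c).takeWhile (· == line.getD c 0)).length) 0
          ≠ line.getD c 0 := by
      intro hlt heq
      have hdw := pv_drop_takeWhile (line.drop c) (· == line.getD c 0)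
      have hlenD : ((line.drop c).dropWhile (· == line.getD c 0)) ≠ [] := by
        rw [← hdw]
        intro hnil
        have hnl := congrArg List.length hnil
        rw [List.length_drop, List.length_drop, List.length_nil] at hnl
        omega
      obtain ⟨x, xs, hD⟩ := List.exists_cons_of_ne_nil hlenD
      have hhead := List.head?_dropWhile_not (· == line.getD c 0) (line.drop c)
      rw [hD] at hhead
      simp only [List.head?_cons] at hhead
      have hx : line.getD (c + ((line.drop c).takeWhile (· == line.getD c 0)).length) 0 = x := by
        rw [List.getD_eq_getElem?_getD, ← List.getElem?_drop, ←
          Nat.add_zero (n := ((line.drop c).takeWhile (· == line.getD c 0)).length), ←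
          List.getElem?_drop, hdw, hD]
        simp
      have hxv : x = line.getD c 0 := hx.symm.trans heq
      rw [hxv] at hhead
      simp at hhead
    have hInv' : pvInv line (c + ((line.drop c).takeWhile (· == line.getD c 0)).length) := by
      by_cases hn : c + ((line.drop c).takeWhile (· == line.getD c 0)).length < line.length
      · right; right; left
        intro heq
        have hval : line.getD (c + ((line.drop c).takeWhile (· == line.getD c 0)).length - 1) 0
            = line.getD c 0 := hF1 _ (by omega) (by omega)
        exact hF3 hn (heq.symm.trans hval)
      · right; left; omega
    rw [hA] at ih ⊢
    rw [ih hInv']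
    have hsplit : List.range' c (line.length - c)
        = List.range' c ((line.drop c).takeWhile (· == line.getD c 0)).length ++
          List.range' (c + ((line.drop c).takeWhile (· == line.getD c 0)).length)
            (line.length - (c + ((line.drop c).takeWhile (· == line.getD c 0)).length)) := by
      rw [show line.length - c = ((line.drop c).takeWhile (· == line.getD c 0)).length +
          (line.length - (c + ((line.drop c).takeWhile (· == line.getD c 0)).length)) from by
        omega]
      rw [← List.range'_append]
      simp
    rw [hsplit]
    simp only [pvStencil, List.foldl_append]
    have hhit : ∀ i ∈ List.range' c ((line.drop c).takeWhile (· == line.getD c 0)).length,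
        pvLineHit line i = decide (3 ≤ ((line.drop c).takeWhile (· == line.getD c 0)).length) := by
      intro i hi
      rw [List.mem_range'_1] at hi
      have := pvLineHit_run line c (c + ((line.drop c).takeWhile (· == line.getD c 0)).length)
        hInv hc hne' (by omega) hF1 hF3 i hi.1 hi.2
      rw [this]
      congr 1
      simp only [eq_iff_iff]
      omega
    by_cases h3 : 3 ≤ ((line.drop c).takeWhile (· == line.getD c 0)).length
    · rw [if_pos (show 3 ≤ c + ((line.drop c).takeWhile (· == line.getD c 0)).length - c by
        omega)]
      rw [show c + ((line.drop c).takeWhile (· == line.getD c 0)).length - c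
          = ((line.drop c).takeWhile (· == line.getD c 0)).length from by omega]
      congr 1
      exact (pvStencil_run_true line mk c _ acc
        (fun i hi => by rw [hhit i hi]; exact decide_eq_true h3)).symm
    · rw [if_neg (show ¬ 3 ≤ c + ((line.drop c).takeWhile (· == line.getD c 0)).length - c by
        omega)]
      congr 1
      exact (pvStencil_skip line mk _ acc
        (fun i hi => by rw [hhit i hi]; exact decide_eq_false h3)).symm
  | case2 c acc hc hne ih =>
    intro hInv
    have h1 : line.getD c 0 = -1 := by simpa using hne
    have hInv' : pvInv line (c + 1) := by
      right; right; right
      simpa using h1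
    rw [ih hInv']
    rw [show line.length - c = (line.length - (c + 1)) + 1 from by omega, List.range'_succ]
    simp only [pvStencil, List.foldl_cons]
    have hf : pvLineHit line c = false := by
      simp only [pvLineHit, bWindowHit]
      rw [if_pos h1]
    rw [hf]
    simp
  | case3 c acc hc =>
    intro _
    rw [show line.length - c = 0 from by omega]
    rfl

theorem aScan_eq_pvStencil' (line : List Int) (n : Nat) (mk : Nat → Int × Int)
    (hn : n = line.length) (acc : List (Int × Int)) :
    aScan line n mk 0 acc = pvStencil line mk (List.range n) acc := by
  subst hn
  rw [aScan_eq_pvStencil line mk 0 acc (Or.inl rfl), Nat.sub_zero, ← List.range_eq_range']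

-- ===== VERDICT (by name: the statement is the Claim_ definition above) =====
theorem detecter_alignements_spec : Claim_equal_detecter_alignements := by
  intro grille _hDom hPre
  unfold Spec_detecter_alignements
  obtain ⟨_hne, hrect⟩ := hPre
  simp only [detecter_alignements, detecter_alignements_alt]
  have hH : ∀ l ∈ List.range grille.length, ∀ acc : List (Int × Int),
      aScan (grille.getD l []) (grille.getD 0 []).length (fun i => ((l : Int), (i : Int))) 0 acc
        = (List.range (grille.getD 0 []).length).foldl (fun acc (c : Nat) =>
            if bWindowHit (fun k => (grille.getD l []).getD k 0) c (grille.getD 0 []).length then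
              PySem.Set.add acc ((l : Int), (c : Int)) else acc) acc := by
    intro l hl acc
    rw [List.mem_range] at hl
    have hmem : grille.getD l [] ∈ grille := by
      rw [List.getD_eq_getElem _ _ hl]; exact List.getElem_mem hl
    have hrow : (grille.getD 0 []).length ≤ (grille.getD l []).length := hrect _ hmem
    have hlt : ((grille.getD l []).take (grille.getD 0 []).length).length
        = (grille.getD 0 []).length := by
      rw [List.length_take]; omega
    rw [aScan_congr (grille.getD l []) ((grille.getD l []).take (grille.getD 0 []).length)
      (grille.getD 0 []).length _ (fun k hk => (pv_getD_take _ _ _ hk).symm) 0 acc]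
    rw [aScan_eq_pvStencil' _ _ _ hlt.symm acc]
    refine PySem.List.foldl_congr_mem' _ _ _ _ (fun i hi acc' => ?_)
    rw [List.mem_range] at hi
    have : pvLineHit ((grille.getD l []).take (grille.getD 0 []).length) i
        = bWindowHit (fun k => (grille.getD l []).getD k 0) i (grille.getD 0 []).length := by
      unfold pvLineHit
      rw [hlt]
      exact pv_bWindowHit_congr _ _ i (grille.getD 0 []).length hi
        (fun k hk => pv_getD_take _ _ _ hk)
    rw [this]
  have hV : ∀ j ∈ List.range (grille.getD 0 []).length, ∀ acc : List (Int × Int),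
      aScan (grille.map (fun r => r.getD j 0)) grille.length (fun i => ((i : Int), (j : Int))) 0 acc
        = (List.range grille.length).foldl (fun acc (i : Nat) =>
            if bWindowHit (fun k => (grille.getD k []).getD j 0) i grille.length then
              PySem.Set.add acc ((i : Int), (j : Int)) else acc) acc := by
    intro j _hj acc
    have hcl : (grille.map (fun r => r.getD j 0)).length = grille.length := by simp
    rw [aScan_eq_pvStencil' _ _ _ hcl.symm acc]
    refine PySem.List.foldl_congr_mem' _ _ _ _ (fun i _hi acc' => ?_)
    have : pvLineHit (grille.map (fun r => r.getD j 0)) i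
        = bWindowHit (fun k => (grille.getD k []).getD j 0) i
            (grille.map (fun r => r.getD j 0)).length := by
      unfold pvLineHit
      congr 1
      funext k
      exact pv_col_getD grille j k
    rw [this, hcl]
  rw [PySem.List.foldl_congr_mem' _ _ _ _ (fun l hl acc => hH l hl acc)]
  exact PySem.List.foldl_congr_mem' _ _ _ _ (fun j hj acc => hV j hj acc)
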